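-- pv_equiv track=rewrite | github.com/andrei-calin-dragomir/ease25-repl-pkg | code/control_group/codon/source/k_nucleotide.py | seq_lines
-- ===== SOURCE A (Python) =====
-- def seq_lines(input_lines):
--     i = 0
--     for line in input_lines:
--         i += 1
--         if line.startswith(">THREE"):
--             break
--     lines : list[str] = []
--     for line in input_lines[i:]:
--         if line.startswith(">"):
--             break
--         lines.append( line[:-1] )
--     return lines
-- ===== SOURCE B (Python) =====
-- def seq_lines(input_lines):
--     headers = [i for i, line in enumerate(input_lines) if line.startswith(">")]
--     starts = [i for i, line in enumerate(input_lines) if line.startswith(">THREE")]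
--     if not starts:
--         return []
--     s = starts[0]
--     after = [i for i in headers if i > s]
--     e = after[0] if after else len(input_lines)
--     return [line[:-1] for line in input_lines[s + 1 : e]]
-- ===== Notes on version B (the rewrite author's own statement) =====
-- stated objective: alternative
-- what changed: Replaced A's sequential header-search scan followed by a slice-and-collect loop with an index-based formulation: build the lists of all '>' and '>THREE' header positions via enumerate, pick the first start and the next header after it by index arithmetic, and map line[:-1] over a single slice between them.
import Mathlib
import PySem

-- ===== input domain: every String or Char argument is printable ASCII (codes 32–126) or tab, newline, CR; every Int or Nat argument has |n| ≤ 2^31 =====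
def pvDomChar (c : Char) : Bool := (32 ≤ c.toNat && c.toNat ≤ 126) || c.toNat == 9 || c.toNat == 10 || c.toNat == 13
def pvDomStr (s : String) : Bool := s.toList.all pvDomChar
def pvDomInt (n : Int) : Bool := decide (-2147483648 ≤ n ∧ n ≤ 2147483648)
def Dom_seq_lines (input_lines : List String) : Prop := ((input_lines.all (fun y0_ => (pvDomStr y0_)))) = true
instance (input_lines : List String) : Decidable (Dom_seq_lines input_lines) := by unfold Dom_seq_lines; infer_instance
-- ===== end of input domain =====

-- B replaces A's linear header-search-then-collect scan by index arithmetic: it builds the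
-- lists of all header positions, picks the first ">THREE" position and the next header after
-- it, and maps line[:-1] over one slice (different decomposition; same O(n) cost).


-- ===== PORT A =====
-- first loop: i counts lines up to and including the first ">THREE" header
def seqFind (lines : List String) (i : Int) : Int :=
  match lines with
  | [] => i
  | line :: rest =>
      if PySem.Str.startswith line ">THREE" then i + 1 else seqFind rest (i + 1)

-- second loop over input_lines[i:]
def seqCollect (lines : List String) : List String :=
  match lines with
  | [] => []
  | line :: rest =>
      if PySem.Str.startswith line ">" then []
      else PySem.Str.slice line none (some (-1)) :: seqCollect rest

def seq_lines (input_lines : List String) : List String :=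
  seqCollect (PySem.List.slice input_lines (some (seqFind input_lines 0)) none)

-- ===== PORT B =====
-- headers/starts comprehensions over enumerate, then index arithmetic and one slice
def seq_lines_alt (input_lines : List String) : List String :=
  let headers := ((PySem.List.enumerate input_lines 0).filter
      (fun p => PySem.Str.startswith p.2 ">")).map (fun p => p.1)
  let starts := ((PySem.List.enumerate input_lines 0).filter
      (fun p => PySem.Str.startswith p.2 ">THREE")).map (fun p => p.1)
  match starts with
  | [] => []
  | s :: _ =>
      let after := headers.filter (fun i => s < i)
      let e : Int :=
        match after with
        | [] => (input_lines.length : Int)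
        | e0 :: _ => e0
      (PySem.List.slice input_lines (some (s + 1)) (some e)).map
        (fun line => PySem.Str.slice line none (some (-1)))

-- ===== PRECONDITION & SPEC =====
def Spec_seq_lines (input_lines : List String) (out : List String) : Prop := out = seq_lines_alt input_lines
instance (input_lines : List String) (out : List String) : Decidable (Spec_seq_lines input_lines out) := by unfold Spec_seq_lines; infer_instance

-- ===== CLAIM (what is proved, stated in full; the proofs are below) =====
def Claim_equal_seq_lines : Prop := ∀ (input_lines : List String), Dom_seq_lines input_lines → Spec_seq_lines input_lines (seq_lines input_lines)

-- ===== LEMMAS AND PROOFS =====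

-- proof-side predicates and the index-comprehension abbreviation
def pT (l : String) : Bool := PySem.Str.startswith l ">THREE"
def pH (l : String) : Bool := PySem.Str.startswith l ">"
def strCut (line : String) : String := PySem.Str.slice line none (some (-1))

def idxF (q : String → Bool) (xs : List String) (s : Int) : List Int :=
  ((PySem.List.enumerate xs s).filter (fun p => q p.2)).map (fun p => p.1)

-- B written with the abbreviations (definitionally equal to seq_lines_alt)
def altSpec (xs : List String) : List String :=
  match idxF pT xs 0 with
  | [] => []
  | s :: _ =>
      let after := (idxF pH xs 0).filter (fun i => s < i)
      let e : Int :=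
        match after with
        | [] => (xs.length : Int)
        | e0 :: _ => e0
      (PySem.List.slice xs (some (s + 1)) (some e)).map strCut

theorem alt_eq_spec (xs : List String) : seq_lines_alt xs = altSpec xs := rfl

-- single-pass state machine (proof intermediary between A and B)
def seqGo (capturing : Bool) (lines : List String) : List String :=
  match capturing, lines with
  | _, [] => []
  | true, line :: rest =>
      if PySem.Str.startswith line ">" then []
      else strCut line :: seqGo true rest
  | false, line :: rest =>
      if PySem.Str.startswith line ">THREE" then seqGo true rest
      else seqGo false rest

-- ---- A = seqGo false ----
theorem seqFind_shift (xs : List String) (i : Int) :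
    seqFind xs (i + 1) = seqFind xs i + 1 := by
  induction xs generalizing i with
  | nil => simp [seqFind]
  | cons l rest ih =>
      simp only [seqFind]
      split_ifs with h
      · rfl
      · exact ih (i + 1)

theorem seqFind_nonneg (xs : List String) : 0 ≤ seqFind xs 0 := by
  induction xs with
  | nil => simp [seqFind]
  | cons l rest ih =>
      simp only [seqFind]
      split_ifs with h
      · norm_num
      · rw [seqFind_shift]; omega

theorem seqCollect_eq_go_true (xs : List String) :
    seqCollect xs = seqGo true xs := by
  induction xs with
  | nil => rfl
  | cons l rest ih => simp only [seqCollect, seqGo, strCut, ih]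

theorem seq_lines_eq_go (xs : List String) :
    seq_lines xs = seqGo false xs := by
  induction xs with
  | nil => rfl
  | cons l rest ih =>
      unfold seq_lines
      simp only [seqFind, seqGo]
      split_ifs with h
      · have h1 : (0:Int) + 1 = 1 := by norm_num
        rw [h1, PySem.List.slice_from_one, List.tail_cons]
        exact seqCollect_eq_go_true rest
      · rw [seqFind_shift]
        have h0 := seqFind_nonneg rest
        rw [PySem.List.slice_from (l :: rest) (a := seqFind rest 0 + 1) (by omega)]
        have ht : (seqFind rest 0 + 1).toNat = (seqFind rest 0).toNat + 1 := by omega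
        rw [ht, List.drop_succ_cons]
        unfold seq_lines at ih
        rw [PySem.List.slice_from rest h0] at ih
        exact ih

-- ---- structural lemmas for idxF ----
theorem idxF_nil (q : String → Bool) (s : Int) : idxF q [] s = [] := by
  simp [idxF, PySem.List.enumerate_nil]

theorem idxF_cons (q : String → Bool) (x : String) (xs : List String) (s : Int) :
    idxF q (x :: xs) s = (if q x then [s] else []) ++ idxF q xs (s + 1) := by
  by_cases h : q x <;> simp [idxF, PySem.List.enumerate_cons, h]

theorem idxF_shift (q : String → Bool) (xs : List String) (s : Int) :
    idxF q xs (s + 1) = (idxF q xs s).map (· + 1) := by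
  induction xs generalizing s with
  | nil => simp [idxF_nil]
  | cons x xs ih =>
      rw [idxF_cons, idxF_cons, ih (s + 1), List.map_append]
      by_cases h : q x <;> simp [h]

theorem idxF_mem_le (q : String → Bool) (xs : List String) (s : Int) :
    ∀ i ∈ idxF q xs s, s ≤ i := by
  induction xs generalizing s with
  | nil => simp [idxF_nil]
  | cons x xs ih =>
      intro i hi
      rw [idxF_cons] at hi
      rcases List.mem_append.1 hi with h1 | h2
      · by_cases h : q x
        · simp [h] at h1; omega
        · simp [h] at h1
      · have := ih (s + 1) i h2; omega

theorem firstIdx_eq (q : String → Bool) (xs : List String) :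
    (match idxF q xs 0 with
     | [] => (xs.length : Int)
     | h :: _ => h) = (xs.findIdx q : Int) := by
  induction xs with
  | nil => simp [idxF_nil]
  | cons x xs ih =>
      rw [idxF_cons]
      by_cases h : q x
      · simp [h, List.findIdx_cons]
      · have hsh : idxF q xs (0 + 1) = (idxF q xs 0).map (· + 1) := idxF_shift q xs 0
        simp only [h, if_false, Bool.false_eq_true, List.nil_append, hsh]
        cases hfx : idxF q xs 0 with
        | nil =>
            rw [hfx] at ih; simp only [] at ih
            simp [List.findIdx_cons, h, ← ih]
        | cons h0 t =>
            rw [hfx] at ih; simp only [] at ih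
            simp [List.findIdx_cons, h, ← ih]

theorem seqGo_true_eq (xs : List String) :
    seqGo true xs = (xs.take (xs.findIdx pH)).map strCut := by
  induction xs with
  | nil => rfl
  | cons x xs ih =>
      by_cases h : pH x
      · simp only [seqGo, List.findIdx_cons]
        rw [if_pos (by simpa [pH] using h)]
        simp [h]
      · simp only [seqGo, List.findIdx_cons]
        rw [if_neg (by simpa [pH] using h)]
        simp [h, ih]

theorem pT_imp_pH (l : String) : pT l = true → pH l = true := by
  simp only [pT, pH, PySem.Str.startswith_eq]
  rw [PySem.Chars.startswith_iff, PySem.Chars.startswith_iff]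
  intro h
  exact List.IsPrefix.trans (by decide) h

-- ---- B = seqGo false ----
theorem altSpec_eq_go (xs : List String) : altSpec xs = seqGo false xs := by
  induction xs with
  | nil => rfl
  | cons x xs ih =>
      have hshT : idxF pT xs (0 + 1) = (idxF pT xs 0).map (· + 1) := idxF_shift pT xs 0
      have hshH : idxF pH xs (0 + 1) = (idxF pH xs 0).map (· + 1) := idxF_shift pH xs 0
      unfold altSpec
      rw [idxF_cons pT, idxF_cons pH, hshT, hshH]
      by_cases hT : pT x
      · -- header found at the head: s = 0
        have hH : pH x = true := pT_imp_pH x hT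
        simp only [hT, hH, if_true, List.singleton_append]
        have hafter :
            ((0 :: (idxF pH xs 0).map (· + 1)).filter (fun i => (0:Int) < i))
              = (idxF pH xs 0).map (· + 1) := by
          rw [List.filter_cons, if_neg (by simp)]
          apply List.filter_eq_self.2
          intro a ha
          rcases List.mem_map.1 ha with ⟨b, hb, rfl⟩
          have := idxF_mem_le pH xs 0 b hb
          simp; omega
        rw [hafter]
        have hgo : seqGo false (x :: xs) = seqGo true xs := by
          simp only [seqGo]; rw [if_pos (by simpa [pT] using hT)]
        rw [hgo, seqGo_true_eq]
        have he :
            (match (idxF pH xs 0).map (· + 1) with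
             | [] => ((x :: xs).length : Int)
             | e0 :: _ => e0) = ((xs.findIdx pH : Int) + 1) := by
          have hf := firstIdx_eq pH xs
          cases hfx : idxF pH xs 0 with
          | nil =>
              rw [hfx] at hf; simp only [] at hf
              simp [← hf]
          | cons h0 t =>
              rw [hfx] at hf; simp only [] at hf
              simp [← hf]
        rw [he, PySem.List.slice_toNat _ (by omega) (by omega)]
        have h2 : ((0:Int) + 1).toNat = 0 + 1 := by omega
        have h3 : ((xs.findIdx pH : Int) + 1).toNat - ((0:Int) + 1).toNat = xs.findIdx pH := by
          omega
        rw [h3, h2, List.drop_succ_cons, List.drop_zero]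
      · -- head is not the ">THREE" header
        have hT' : pT x = false := by simpa using hT
        simp only [hT', Bool.false_eq_true, if_false, List.nil_append]
        have hgo : seqGo false (x :: xs) = seqGo false xs := by
          simp only [seqGo]; rw [if_neg (by simpa [pT] using hT)]
        rw [hgo, ← ih]
        unfold altSpec
        cases hfx : idxF pT xs 0 with
        | nil => simp
        | cons s0 t =>
            have hs0 : 0 ≤ s0 := idxF_mem_le pT xs 0 s0 (by rw [hfx]; exact List.mem_cons_self ..)
            simp only [List.map_cons]
            have hafter :
                (((if pH x = true then [(0:Int)] else []) ++ (idxF pH xs 0).map (· + 1)).filter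
                    (fun i => s0 + 1 < i))
                  = ((idxF pH xs 0).filter (fun i => s0 < i)).map (· + 1) := by
              rw [List.filter_append, List.filter_map]
              have h1 : ((if pH x = true then [(0:Int)] else []).filter (fun i => s0 + 1 < i)) = [] := by
                by_cases h : pH x = true <;> simp [h] <;> omega
              rw [h1, List.nil_append]
              congr 1
              apply List.filter_congr
              intro a _
              simp
            rw [hafter]
            have hex : ∀ (eo : Int), 0 ≤ eo →
                (PySem.List.slice (x :: xs) (some (s0 + 1 + 1)) (some (eo + 1))).map strCut
                  = (PySem.List.slice xs (some (s0 + 1)) (some eo)).map strCut := by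
              intro eo heo
              rw [PySem.List.slice_toNat _ (by omega) (by omega),
                PySem.List.slice_toNat _ (by omega) (by omega)]
              have h2 : (s0 + 1 + 1).toNat = (s0 + 1).toNat + 1 := by omega
              have h3 : (eo + 1).toNat - (s0 + 1 + 1).toNat = eo.toNat - (s0 + 1).toNat := by omega
              rw [h3, h2, List.drop_succ_cons]
            cases hfa : (idxF pH xs 0).filter (fun i => s0 < i) with
            | nil =>
                simp only [List.map_nil]
                have hlen : ((x :: xs).length : Int) = (xs.length : Int) + 1 := by
                  simp
                rw [hlen]
                exact hex (xs.length : Int) (by positivity)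
            | cons e0 t2 =>
                have he0 : 0 ≤ e0 := by
                  have hm : e0 ∈ (idxF pH xs 0).filter (fun i => s0 < i) := by
                    rw [hfa]; exact List.mem_cons_self ..
                  have := idxF_mem_le pH xs 0 e0 (List.mem_of_mem_filter hm)
                  omega
                simp only [List.map_cons]
                exact hex e0 he0

-- ===== VERDICT (by name: the statement is the Claim_ definition above) =====
theorem seq_lines_spec : Claim_equal_seq_lines := by
  intro xs _
  unfold Spec_seq_lines
  rw [seq_lines_eq_go, alt_eq_spec, altSpec_eq_go]
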